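-- pv_equiv track=rewrite | github.com/zaini/advent-of-code-2021 | day-10/solution.py | get_incomplete_stack
-- ===== SOURCE A (Python) =====
-- PAIR = {
--     ")": "(",
--     "]": "[",
--     "}": "{",
--     ">": "<"
-- }
--
-- def get_incomplete_stack(x):
--     S = []
--     for c in x:
--         if S and c in PAIR and S[-1] == PAIR[c]:
--             S.pop()
--         else:
--             S.append(c)
--     return S
-- ===== SOURCE B (Python) =====
-- PAIR = {
--     ")": "(",
--     "]": "[",
--     "}": "{",
--     ">": "<"
-- }
--
-- def get_incomplete_stack(x):
--     # Iterative adjacent-pair reduction: repeatedly delete the leftmost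
--     # adjacent matching bracket pair until the list is irreducible.
--     S = list(x)
--     while True:
--         for i in range(len(S) - 1):
--             if S[i + 1] in PAIR and S[i] == PAIR[S[i + 1]]:
--                 del S[i:i + 2]
--                 break
--         else:
--             return S
-- ===== Notes on version B (the rewrite author's own statement) =====
-- stated objective: alternative
-- what changed: Replaces A's single left-to-right stack pass by repeated leftmost adjacent matching-pair cancellation on the character list until no pair remains (a fixpoint rewriting loop instead of a stack).
import Mathlib
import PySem

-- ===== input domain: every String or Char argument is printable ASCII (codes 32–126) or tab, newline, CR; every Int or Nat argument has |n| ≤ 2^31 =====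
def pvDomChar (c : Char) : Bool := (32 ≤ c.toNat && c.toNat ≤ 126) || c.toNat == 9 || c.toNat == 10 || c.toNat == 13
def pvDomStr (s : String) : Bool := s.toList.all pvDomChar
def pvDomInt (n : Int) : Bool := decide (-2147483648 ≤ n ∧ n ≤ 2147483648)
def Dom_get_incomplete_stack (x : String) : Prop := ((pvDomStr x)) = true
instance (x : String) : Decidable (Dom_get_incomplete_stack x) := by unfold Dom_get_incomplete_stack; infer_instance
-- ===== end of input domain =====

-- B replaces A's single stack pass by repeated leftmost adjacent-pair cancellation
-- to a fixpoint (objective: alternative decomposition; not faster).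

-- ===== PORT A =====
def PAIR : PySem.Dict String String :=
  PySem.Dict.ofList [(")", "("), ("]", "["), ("}", "{"), (">", "<")]

-- one iteration of A's loop body: if S and c in PAIR and S[-1] == PAIR[c]: S.pop() else S.append(c)
def pyStep (S : List String) (c : String) : List String :=
  if !S.isEmpty && (PAIR.get? c).isSome && (S.getLast? == PAIR.get? c) then S.dropLast
  else S ++ [c]

def get_incomplete_stack (x : String) : List String :=
  (x.toList.map (fun ch => String.ofList [ch])).foldl pyStep []

-- ===== PORT B =====
-- S[i+1] in PAIR and S[i] == PAIR[S[i+1]]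
def cancels (a c : String) : Bool :=
  match PAIR.get? c with
  | some o => a == o
  | none => false

-- the inner 'for i in range(len(S)-1)': find the leftmost adjacent matching pair
-- and return the list with the two elements deleted (none = the for-loop's else).
def step1 : List String → Option (List String)
  | a :: b :: t => if cancels a b then some t else (step1 (b :: t)).map (a :: ·)
  | _ => none

theorem step1_length : ∀ {l l' : List String}, step1 l = some l' → l'.length < l.length
  | a :: b :: t, l', h => by
    by_cases hc : cancels a b
    · simp [step1, hc] at h; simp [← h]
    · simp [step1, hc] at h
      obtain ⟨m, hm, rfl⟩ := h
      have := step1_length hm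
      simp only [List.length_cons] at this ⊢
      omega

-- the 'while True' loop of B: reduce until no pair is found
def reduce (l : List String) : List String :=
  match h : step1 l with
  | some l' => reduce l'
  | none => l
  termination_by l.length
  decreasing_by exact step1_length h

def get_incomplete_stack_alt (x : String) : List String :=
  reduce ((x.toList.map (fun ch => String.ofList [ch])))

-- ===== PRECONDITION & SPEC =====
def Spec_get_incomplete_stack (x : String) (out : List String) : Prop := out = get_incomplete_stack_alt x
instance (x : String) (out : List String) : Decidable (Spec_get_incomplete_stack x out) := by unfold Spec_get_incomplete_stack; infer_instance

-- ===== CLAIM (what is proved, stated in full; the proofs are below) =====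
def Claim_equal_get_incomplete_stack : Prop := ∀ (x : String), Dom_get_incomplete_stack x → Spec_get_incomplete_stack x (get_incomplete_stack x)

-- ===== LEMMAS AND PROOFS =====

theorem reduce_none {l : List String} (h : step1 l = none) : reduce l = l := by
  rw [reduce]
  split
  · next heq => rw [h] at heq; cases heq
  · rfl

theorem reduce_some {l l' : List String} (h : step1 l = some l') : reduce l = reduce l' := by
  rw [reduce]
  split
  · next m heq => rw [h] at heq; cases heq; rfl
  · next heq => rw [h] at heq; cases heq

-- an irreducible list stays irreducible when an element that does not cancel with its last is appended
theorem step1_none_of_prefix : ∀ (S t : List String), step1 (S ++ t) = none → step1 S = none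
  | [], _, _ => rfl
  | [_], _, _ => rfl
  | a :: b :: S', t, h => by
    simp only [List.cons_append, step1] at h ⊢
    by_cases hc : cancels a b
    · simp [hc] at h
    · simp only [hc, Bool.false_eq_true, if_false, Option.map_eq_none_iff] at h ⊢
      exact step1_none_of_prefix (b :: S') t h

-- leftmost reduction of an irreducible stack followed by c :: rest
theorem step1_irred_append : ∀ (S : List String), step1 S = none → ∀ (c : String) (rest : List String),
    step1 (S ++ c :: rest) =
      match S.getLast? with
      | some a => if cancels a c then some (S.dropLast ++ rest) else (step1 (c :: rest)).map (S ++ ·)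
      | none => step1 (c :: rest)
  | [], _, c, rest => by simp
  | [a], _, c, rest => by
    simp only [List.cons_append, List.nil_append, step1, List.getLast?_singleton]
    by_cases hc : cancels a c
    · simp [hc]
    · simp [hc]
  | a :: b :: S', hS, c, rest => by
    have hc : cancels a b = false := by
      by_contra hne
      simp [step1, Bool.of_not_eq_false hne] at hS
    have hS' : step1 (b :: S') = none := by
      simp [step1, hc] at hS; exact hS
    simp only [List.cons_append, step1, hc, Bool.false_eq_true, if_false]
    have IH := step1_irred_append (b :: S') hS' c rest
    simp only [List.cons_append] at IH
    rw [IH]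
    have hlast : (a :: b :: S').getLast? = (b :: S').getLast? := by
      simp [List.getLast?_cons_cons]
    cases hgl : (b :: S').getLast? with
    | none => simp at hgl
    | some z =>
      rw [hlast, hgl]
      by_cases hz : cancels z c
      · simp [hz, List.dropLast]
      · simp only [hz, Bool.false_eq_true, if_false, Option.map_map]
        rfl

-- A's boolean pop-condition, on a stack with last element a, is exactly 'cancels a c'
theorem pyStep_cond (S' : List String) (a c : String) :
    (!((S' ++ [a]).isEmpty) && (PAIR.get? c).isSome && ((S' ++ [a]).getLast? == PAIR.get? c)) = cancels a c := by
  cases hg : PAIR.get? c with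
  | none => simp [cancels, hg]
  | some o =>
    simp [cancels, hg, List.getLast?_append]

-- main invariant: for an irreducible stack S, B's fixpoint reduction of S ++ t
-- equals A's fold of t starting from S
theorem reduce_eq_foldl : ∀ (t S : List String), step1 S = none →
    reduce (S ++ t) = t.foldl pyStep S
  | [], S, hS => by simpa using reduce_none hS
  | c :: rest, S, hS => by
    rw [List.foldl_cons]
    rcases hSe : S.getLast? with _ | a
    · -- S = []
      have hnil : S = [] := by simpa using hSe
      subst hnil
      have hstep : pyStep [] c = [c] := by simp [pyStep]
      rw [hstep, List.nil_append]
      exact reduce_eq_foldl rest [c] rfl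
    · -- S = S' ++ [a]
      obtain ⟨S', rfl⟩ : ∃ S', S = S' ++ [a] := by
        rcases List.eq_nil_or_concat S with rfl | ⟨S'', z, rfl⟩
        · simp at hSe
        · rw [List.concat_eq_append, List.getLast?_append, List.getLast?_singleton,
            Option.some_or] at hSe
          obtain rfl : z = a := by simpa using hSe
          exact ⟨S'', by rw [List.concat_eq_append]⟩
      have hstep := step1_irred_append (S' ++ [a]) hS c rest
      rw [List.getLast?_append, List.getLast?_singleton, Option.some_or] at hstep
      by_cases hc : cancels a c
      · -- cancellation: both sides pop a
        have hpy : pyStep (S' ++ [a]) c = S' := by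
          simp only [pyStep, pyStep_cond, hc, if_true]
          simp
        have hred : step1 (S' ++ [a] ++ c :: rest) = some (S' ++ rest) := by
          rw [hstep]
          simp [hc]
        rw [hpy, reduce_some hred]
        exact reduce_eq_foldl rest S' (step1_none_of_prefix S' [a] hS)
      · -- no cancellation: push c and keep reducing
        have hpy : pyStep (S' ++ [a]) c = (S' ++ [a]) ++ [c] := by
          simp only [pyStep, pyStep_cond]
          rw [if_neg hc]
        have hirr : step1 ((S' ++ [a]) ++ [c]) = none := by
          have h2 := step1_irred_append (S' ++ [a]) hS c []
          rw [List.getLast?_append, List.getLast?_singleton, Option.some_or] at h2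
          rw [h2]
          simp [hc, step1]
        rw [hpy, show (S' ++ [a]) ++ c :: rest = ((S' ++ [a]) ++ [c]) ++ rest by simp]
        exact reduce_eq_foldl rest ((S' ++ [a]) ++ [c]) hirr
  termination_by t => t.length

-- ===== VERDICT (by name: the statement is the Claim_ definition above) =====
theorem get_incomplete_stack_spec : Claim_equal_get_incomplete_stack := by
  intro x _
  unfold Spec_get_incomplete_stack get_incomplete_stack get_incomplete_stack_alt
  have h := reduce_eq_foldl (x.toList.map (fun ch => String.ofList [ch])) [] rfl
  rw [List.nil_append] at h
  exact h.symm
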